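-- pv_equiv track=rewrite | github.com/sm745052/CHAT-AS-ANALYSIS | code/eval/eval_p.py | get_points_by_prefix_length
-- ===== SOURCE A (Python) =====
-- from collections import defaultdict
-- from typing import List, Dict, Any, Tuple
--
-- def get_points_by_prefix_length(
--     points: List[List[Any]],
-- ) -> Dict[int, List[List[Any]]]:
--     points_by_prefix_length = defaultdict(list)
--     for point in points:
--         prefix_length = len(point[0])
--         points_by_prefix_length[prefix_length].append(point)
--     return points_by_prefix_length
-- ===== SOURCE B (Python) =====
-- from collections import defaultdict
-- from typing import List, Dict, Any
--
--
-- def get_points_by_prefix_length(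
--     points: List[List[Any]],
-- ) -> Dict[int, List[List[Any]]]:
--     # key-major grouping: distinct keys in first-occurrence order, then
--     # one filter pass per key; defaultdict so missing keys still yield [].
--     keys = list(dict.fromkeys(len(p[0]) for p in points))
--     return defaultdict(
--         list, {k: [p for p in points if len(p[0]) == k] for k in keys}
--     )
-- ===== Notes on version B (the rewrite author's own statement) =====
-- stated objective: alternative
-- what changed: Replaces the single-pass dict-append loop by key-major grouping: collect the distinct prefix lengths in first-occurrence order with dict.fromkeys, then build each group by filtering the whole list per key.
import Mathlib
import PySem

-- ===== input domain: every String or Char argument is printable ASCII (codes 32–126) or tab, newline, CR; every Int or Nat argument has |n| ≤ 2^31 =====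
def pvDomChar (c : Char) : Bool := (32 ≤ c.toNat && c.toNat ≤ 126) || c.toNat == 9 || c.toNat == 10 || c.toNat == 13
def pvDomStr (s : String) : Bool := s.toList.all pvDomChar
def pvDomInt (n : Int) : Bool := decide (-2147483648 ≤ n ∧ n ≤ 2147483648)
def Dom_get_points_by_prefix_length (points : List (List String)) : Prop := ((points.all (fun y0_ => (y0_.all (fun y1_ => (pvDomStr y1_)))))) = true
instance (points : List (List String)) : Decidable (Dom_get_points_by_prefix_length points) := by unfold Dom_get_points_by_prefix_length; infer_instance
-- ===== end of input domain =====

-- ===== PORT A =====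
-- B changes the decomposition (key-major grouping instead of a single dict-append pass); objective: alternative.
-- Port of A: one pass, appending each point to the bucket of len(point[0]) in an insertion-ordered dict.
def get_points_by_prefix_length (points : List (List String)) : List (Int × List (List String)) :=
  (points.foldl
    (fun d point =>
      d.modify (PySem.Str.len (point.headD "")) [] (fun l => l ++ [point]))
    PySem.Dict.empty).items

-- ===== PORT B =====
-- Port of B: distinct keys in first-occurrence order, then one filter per key.
def get_points_by_prefix_length_alt (points : List (List String)) : List (Int × List (List String)) :=
  let keys := PySem.List.dedup (points.map (fun p => PySem.Str.len (p.headD "")))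
  keys.map (fun k => (k, points.filter (fun p => PySem.Str.len (p.headD "") == k)))

-- ===== PRECONDITION & SPEC =====
-- Pre_ excludes exactly the inputs where A raises IndexError (a point that is the empty list); B raises there too.
def Pre_get_points_by_prefix_length (points : List (List String)) : Prop :=
  ∀ p ∈ points, p ≠ []
instance (points : List (List String)) : Decidable (Pre_get_points_by_prefix_length points) := by
  unfold Pre_get_points_by_prefix_length; infer_instance
def pvWitness_get_points_by_prefix_length : List (List String) := [["ab", "x"], ["cd"], ["a"]]
def Spec_get_points_by_prefix_length (points : List (List String)) (out : List (Int × List (List String))) : Prop := out = get_points_by_prefix_length_alt points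
instance (points : List (List String)) (out : List (Int × List (List String))) : Decidable (Spec_get_points_by_prefix_length points out) := by unfold Spec_get_points_by_prefix_length; infer_instance

-- ===== CLAIM (what is proved, stated in full; the proofs are below) =====
def Claim_equal_get_points_by_prefix_length : Prop := ∀ (points : List (List String)), Dom_get_points_by_prefix_length points → Pre_get_points_by_prefix_length points → Spec_get_points_by_prefix_length points (get_points_by_prefix_length points)

-- ===== LEMMAS AND PROOFS =====

-- A's fold over points equals the same fold over (key, point) pairs.
theorem groupFold_eq_pairFold (points : List (List String)) :
    points.foldl
      (fun d point =>
        d.modify (PySem.Str.len (point.headD "")) [] (fun l => l ++ [point]))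
      PySem.Dict.empty
    = (points.map (fun p => (PySem.Str.len (p.headD ""), p))).foldl
        (fun d q => d.modify q.1 [] (fun l => l ++ [q.2])) PySem.Dict.empty := by
  rw [List.foldl_map]

-- ===== VERDICT (by name: the statement is the Claim_ definition above) =====
theorem get_points_by_prefix_length_spec : Claim_equal_get_points_by_prefix_length := by
  intro points _ _
  show _ = _
  unfold get_points_by_prefix_length get_points_by_prefix_length_alt
  set key : List String → Int := fun p => PySem.Str.len (p.headD "") with hkey
  set d := points.foldl
      (fun d point => d.modify (key point) [] (fun l => l ++ [point]))
      PySem.Dict.empty with hd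
  have hnd : d.keys.Nodup :=
    PySem.Dict.nodup_keys_foldl_modify_key points key [] (fun d x l => l ++ [x])
      PySem.Dict.empty PySem.Dict.nodup_keys_empty
  have hkeys : d.keys = PySem.List.dedup (points.map key) := by
    rw [hd, PySem.Dict.keys_foldl_modify_key, PySem.Dict.keys_empty,
        PySem.Set.update_nil_left, PySem.List.dedup_eq_ofList]
  have hgetD : ∀ k : Int, d.getD k [] = points.filter (fun p => key p == k) := by
    intro k
    rw [hd, groupFold_eq_pairFold, PySem.Dict.getD_foldl_modify_append,
        PySem.Dict.getD_empty, List.nil_append, List.filter_map]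
    rw [List.map_map]
    simp [hkey, Function.comp_def, PySem.Str.len]
  rw [PySem.Dict.items_eq_map_keys d hnd [], hkeys]
  exact List.map_congr_left (fun k _ => by rw [hgetD k])
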